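-- pv_equiv track=rewrite | github.com/maxsaber/LifeOS | api/routes/chat.py | detect_compose_intent
-- ===== SOURCE A (Python) =====
-- def detect_compose_intent(query: str) -> bool:
--     """
--     Detect if the query is asking to compose/draft an email.
--
--     Returns True if the query indicates email composition intent.
--     """
--     query_lower = query.lower()
--
--     # Compose intent patterns
--     compose_patterns = [
--         "draft an email",
--         "draft email",
--         "draft a message",
--         "compose an email",
--         "compose email",
--         "write an email",
--         "write email",
--         "send an email",  # We'll create a draft, not send
--         "send email",
--         "email to ",  # "email to John about..."
--         "write to ",  # "write to Sarah about..."
--         "draft to ",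
--     ]
--
--     return any(pattern in query_lower for pattern in compose_patterns)
-- ===== SOURCE B (Python) =====
-- def detect_compose_intent(query: str) -> bool:
--     """
--     Detect if the query is asking to compose/draft an email.
--
--     Returns True if the query indicates email composition intent.
--     """
--     q = query.lower()
--     patterns = (
--         "draft an email",
--         "draft email",
--         "draft a message",
--         "compose an email",
--         "compose email",
--         "write an email",
--         "write email",
--         "send an email",
--         "send email",
--         "email to ",
--         "write to ",
--         "draft to ",
--     )
--     # single left-to-right scan: at each position, try every pattern as a prefix
--     for i in range(len(q) + 1):
--         if any(q.startswith(p, i) for p in patterns):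
--             return True
--     return False
-- ===== Notes on version B (the rewrite author's own statement) =====
-- stated objective: alternative
-- what changed: A is pattern-major (each pattern does its own full substring scan of the query); B is position-major: one left-to-right scan over the lowered query, checking at each position whether any pattern starts there.
import Mathlib
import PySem

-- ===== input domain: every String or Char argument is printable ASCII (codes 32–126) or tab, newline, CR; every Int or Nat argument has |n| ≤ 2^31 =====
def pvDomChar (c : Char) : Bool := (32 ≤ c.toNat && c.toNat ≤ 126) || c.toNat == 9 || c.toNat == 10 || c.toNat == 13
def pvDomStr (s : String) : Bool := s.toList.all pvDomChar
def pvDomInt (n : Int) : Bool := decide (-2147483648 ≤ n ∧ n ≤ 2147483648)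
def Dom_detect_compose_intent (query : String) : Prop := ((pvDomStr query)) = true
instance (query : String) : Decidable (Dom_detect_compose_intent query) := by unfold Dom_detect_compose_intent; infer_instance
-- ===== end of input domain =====

-- B replaces A's pattern-major repeated substring scans by one position-major scan of the lowered query (alternative decomposition, same cost).


-- ===== PORT A =====
def composePatternsA : List String :=
  ["draft an email", "draft email", "draft a message", "compose an email",
   "compose email", "write an email", "write email", "send an email",
   "send email", "email to ", "write to ", "draft to "]

def detect_compose_intent (query : String) : Bool :=
  let query_lower := PySem.Str.lower query
  composePatternsA.any (fun pattern => PySem.Str.isIn pattern query_lower)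

-- ===== PORT B =====
def composePatternsB : List String :=
  ["draft an email", "draft email", "draft a message", "compose an email",
   "compose email", "write an email", "write email", "send an email",
   "send email", "email to ", "write to ", "draft to "]

-- the loop 'for i in range(len(q)+1): if any(q.startswith(p, i) …)' as recursion on the suffix q[i:]
def scanPositions (pats : List String) : List Char → Bool
  | [] => pats.any (fun p => p.toList.isPrefixOf ([] : List Char))
  | c :: t => pats.any (fun p => p.toList.isPrefixOf (c :: t)) || scanPositions pats t

def detect_compose_intent_alt (query : String) : Bool :=
  scanPositions composePatternsB (PySem.Str.lower query).toList

-- ===== PRECONDITION & SPEC =====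
def Spec_detect_compose_intent (query : String) (out : Bool) : Prop := out = detect_compose_intent_alt query
instance (query : String) (out : Bool) : Decidable (Spec_detect_compose_intent query out) := by unfold Spec_detect_compose_intent; infer_instance

-- ===== CLAIM (what is proved, stated in full; the proofs are below) =====
def Claim_equal_detect_compose_intent : Prop := ∀ (query : String), Dom_detect_compose_intent query → Spec_detect_compose_intent query (detect_compose_intent query)

-- ===== LEMMAS AND PROOFS =====
theorem scanPositions_iff (pats : List String) (s : List Char) :
    scanPositions pats s = true ↔ ∃ p ∈ pats, p.toList <:+: s := by
  induction s with
  | nil => simp [scanPositions, List.any_eq_true, List.isPrefixOf_iff_prefix]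
  | cons c t ih =>
      simp only [scanPositions, Bool.or_eq_true, List.any_eq_true,
        List.isPrefixOf_iff_prefix, ih, List.infix_cons_iff]
      exact ⟨fun h => h.elim (fun ⟨p,hp,h⟩ => ⟨p,hp,Or.inl h⟩) (fun ⟨p,hp,h⟩ => ⟨p,hp,Or.inr h⟩), fun ⟨p,hp,h⟩ => h.elim (fun h => Or.inl ⟨p,hp,h⟩) (fun h => Or.inr ⟨p,hp,h⟩)⟩

-- ===== VERDICT (by name: the statement is the Claim_ definition above) =====
theorem detect_compose_intent_spec : Claim_equal_detect_compose_intent := by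
  intro query _
  show detect_compose_intent query = detect_compose_intent_alt query
  apply Bool.eq_iff_iff.mpr
  rw [detect_compose_intent, detect_compose_intent_alt,
    scanPositions_iff composePatternsB]
  simp only [List.any_eq_true, PySem.Str.isIn_iff_infix]
  rfl
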